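-- pv_equiv track=rewrite | github.com/erfanwork02/password-strength-checker | password_checker.py | penalty_sequences
-- ===== SOURCE A (Python) =====
-- def penalty_sequences(pw: str) -> int:
--     # Penalize obvious forward/backward sequences like 'abcd', '1234'
--     penalty = 0
--     lowers = "abcdefghijklmnopqrstuvwxyz"
--     uppers = lowers.upper()
--     digits = "0123456789"
--     seqs = [lowers, uppers, digits, lowers[::-1], uppers[::-1], digits[::-1]]
--
--     pw_low = pw.lower()
--     for s in seqs:
--         for k in range(4, 8):  # sequences of length 4..7
--             for i in range(0, len(s) - k + 1):
--                 if s[i:i+k] in pw_low: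
--                     penalty += 3  # small per match
--     return min(penalty, 12)
-- ===== SOURCE B (Python) =====
-- def _is_run(sub):
--     d = ord(sub[1]) - ord(sub[0])
--     if d != 1 and d != -1:
--         return False
--     for a, b in zip(sub, sub[1:]):
--         if ord(b) - ord(a) != d:
--             return False
--     return all('a' <= c <= 'z' for c in sub) or all('0' <= c <= '9' for c in sub)
--
-- def penalty_sequences(pw: str) -> int:
--     # Scan the password itself: every length-4..7 window that is a strict
--     # +1/-1 consecutive run of letters or of digits is one match; dedupe.
--     s = pw.lower()
--     found = set()
--     for k in range(4, 8):
--         for p in range(0, len(s) - k + 1):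
--             sub = s[p:p+k]
--             if _is_run(sub):
--                 found.add(sub)
--     return min(3 * len(found), 12)
-- ===== Notes on version B (the rewrite author's own statement) =====
-- stated objective: alternative
-- what changed: Instead of testing each of A's 388 fixed alphabet windows for substring containment, B lowercases the password once and scans its own length-4..7 windows, keeping those that are consecutive same-class +1/-1 runs in a set; the answer is min(3*|set|, 12).
import Mathlib
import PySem

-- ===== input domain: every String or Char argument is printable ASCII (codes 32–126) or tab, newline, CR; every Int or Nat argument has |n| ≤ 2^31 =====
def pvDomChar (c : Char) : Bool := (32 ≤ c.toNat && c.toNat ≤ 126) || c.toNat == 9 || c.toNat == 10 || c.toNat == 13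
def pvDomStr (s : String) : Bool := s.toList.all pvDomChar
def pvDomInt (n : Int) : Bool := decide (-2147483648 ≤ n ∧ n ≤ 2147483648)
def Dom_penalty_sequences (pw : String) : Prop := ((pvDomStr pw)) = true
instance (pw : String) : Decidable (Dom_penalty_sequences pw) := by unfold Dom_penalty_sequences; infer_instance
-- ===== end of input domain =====

-- B replaces A's 388 alphabet-window substring searches by a single scan of the
-- password's own length-4..7 windows, testing each for being a consecutive run
-- (objective: alternative decomposition; same return value on every input).

-- ===== PORT A =====
def penalty_sequences (pw : String) : Int :=
  let lowers : String := "abcdefghijklmnopqrstuvwxyz"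
  let uppers : String := PySem.Str.upper lowers
  let digits : String := "0123456789"
  -- s[::-1]: step -1 ≠ 0, so slice? never returns none; the getD "" is unreachable
  let seqs : List String := [lowers, uppers, digits,
    (PySem.Str.slice? lowers none none (-1)).getD "",
    (PySem.Str.slice? uppers none none (-1)).getD "",
    (PySem.Str.slice? digits none none (-1)).getD ""]
  let pw_low := PySem.Str.lower pw
  let penalty : Int := seqs.foldl (fun pen s =>
      (PySem.List.pyRange 4 8).foldl (fun pen k =>
        (PySem.List.pyRange 0 (PySem.Str.len s - k + 1)).foldl (fun pen i =>
          if PySem.Str.isIn (PySem.Str.slice s (some i) (some (i + k))) pw_low then pen + 3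
          else pen) pen) pen) 0
  min penalty 12

-- ===== PORT B =====
-- _is_run from Source B; Source B only ever calls it on windows of length ≥ 4
def pvIsRun (sub : List Char) : Bool :=
  match sub with
  | a :: b :: _ =>
    let d : Int := (b.toNat : Int) - (a.toNat : Int)
    if d ≠ 1 ∧ d ≠ -1 then false
    else if (sub.zip sub.tail).all (fun p => ((p.2.toNat : Int) - (p.1.toNat : Int)) == d) then
      (sub.all (fun c => decide ('a' ≤ c) && decide (c ≤ 'z'))) ||
      (sub.all (fun c => decide ('0' ≤ c) && decide (c ≤ '9')))
    else false
  | _ => false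

def penalty_sequences_alt (pw : String) : Int :=
  let s : List Char := (PySem.Str.lower pw).toList
  let found : PySem.Set (List Char) :=
    (PySem.List.pyRange 4 8).foldl (fun fnd k =>
      (PySem.List.pyRange 0 ((s.length : Int) - k + 1)).foldl (fun fnd p =>
        if pvIsRun (PySem.List.slice s (some p) (some (p + k))) then
          fnd.add (PySem.List.slice s (some p) (some (p + k)))
        else fnd) fnd) PySem.Set.empty
  min (3 * (found.length : Int)) 12

-- ===== PRECONDITION & SPEC =====
def Spec_penalty_sequences (pw : String) (out : Int) : Prop := out = penalty_sequences_alt pw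
instance (pw : String) (out : Int) : Decidable (Spec_penalty_sequences pw out) := by unfold Spec_penalty_sequences; infer_instance

-- ===== CLAIM (what is proved, stated in full; the proofs are below) =====
def Claim_equal_penalty_sequences : Prop := ∀ (pw : String), Dom_penalty_sequences pw → Spec_penalty_sequences pw (penalty_sequences pw)

-- ===== LEMMAS AND PROOFS =====

lemma pv_char_eq (a b : Char) (h : a.toNat = b.toNat) : a = b := by
  apply Char.ext; exact UInt32.toNat_inj.mp h

lemma pv_char_le_iff (a b : Char) : a ≤ b ↔ a.toNat ≤ b.toNat := by
  rw [Char.le_def]; exact UInt32.le_iff_toNat_le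

lemma pv_toNat_ofNat (n : Nat) (h : n < 55296) : (Char.ofNat n).toNat = n := by
  have hv : n.isValidChar := Or.inl h
  rw [Char.ofNat, dif_pos hv]
  simp [Char.ofNatAux, Char.toNat]

-- A's candidate windows, exactly as A's loops enumerate them
def pvCandsStr : List String :=
  (["abcdefghijklmnopqrstuvwxyz", PySem.Str.upper "abcdefghijklmnopqrstuvwxyz", "0123456789",
    (PySem.Str.slice? "abcdefghijklmnopqrstuvwxyz" none none (-1)).getD "",
    (PySem.Str.slice? (PySem.Str.upper "abcdefghijklmnopqrstuvwxyz") none none (-1)).getD "",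
    (PySem.Str.slice? "0123456789" none none (-1)).getD ""]).flatMap (fun s =>
    (PySem.List.pyRange 4 8).flatMap (fun k =>
      (PySem.List.pyRange 0 (PySem.Str.len s - k + 1)).map (fun i =>
        PySem.Str.slice s (some i) (some (i + k)))))

def pvCands : List (List Char) := pvCandsStr.map String.toList

-- pvIsRun without the class check
def pvMono (sub : List Char) : Bool :=
  match sub with
  | a :: b :: _ =>
    let d : Int := (b.toNat : Int) - (a.toNat : Int)
    (d == 1 || d == -1) &&
    (sub.zip sub.tail).all (fun p => ((p.2.toNat : Int) - (p.1.toNat : Int)) == d)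
  | _ => false

lemma pvIsRun_eq (sub : List Char) :
    pvIsRun sub = (pvMono sub &&
      ((sub.all (fun c => decide ('a' ≤ c) && decide (c ≤ 'z'))) ||
       (sub.all (fun c => decide ('0' ≤ c) && decide (c ≤ '9'))))) := by
  match sub with
  | [] => rfl
  | [a] => rfl
  | a :: b :: r =>
    simp only [pvIsRun, pvMono]
    cases hA : (((a :: b :: r).zip (a :: b :: r).tail).all
        fun p => ((p.2.toNat : Int) - (p.1.toNat : Int)) == ((b.toNat : Int) - (a.toNat : Int))) <;>
      by_cases h1 : ((b.toNat : Int) - (a.toNat : Int)) = 1 <;>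
      by_cases h2 : ((b.toNat : Int) - (a.toNat : Int)) = -1 <;>
      simp [h1, h2, hA]

-- A's nested penalty loops compute 3 · (number of matched candidate windows)
lemma pv_inner (pwl s : String) (k : Int) (l : List Int) (pen : Int) :
    l.foldl (fun pen i =>
        if PySem.Str.isIn (PySem.Str.slice s (some i) (some (i + k))) pwl then pen + 3 else pen) pen
      = pen + 3 * ((l.map (fun i => PySem.Str.slice s (some i) (some (i + k)))).countP
          (fun w => PySem.Str.isIn w pwl) : Int) := by
  induction l generalizing pen with
  | nil => simp
  | cons x l ih =>
    simp only [List.foldl_cons, List.map_cons, List.countP_cons, ih]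
    split_ifs with h <;> simp [h] <;> push_cast <;> ring

lemma pv_mid (pwl s : String) (ks : List Int) (pen : Int) :
    ks.foldl (fun pen k =>
        (PySem.List.pyRange 0 (PySem.Str.len s - k + 1)).foldl (fun pen i =>
          if PySem.Str.isIn (PySem.Str.slice s (some i) (some (i + k))) pwl then pen + 3
          else pen) pen) pen
      = pen + 3 * ((ks.flatMap (fun k =>
          (PySem.List.pyRange 0 (PySem.Str.len s - k + 1)).map (fun i =>
            PySem.Str.slice s (some i) (some (i + k))))).countP
              (fun w => PySem.Str.isIn w pwl) : Int) := by
  induction ks generalizing pen with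
  | nil => simp
  | cons k ks ih =>
    simp only [List.foldl_cons]
    rw [pv_inner, ih, List.flatMap_cons, List.countP_append]
    push_cast; ring

lemma pv_outer (pwl : String) (seqs : List String) (pen : Int) :
    seqs.foldl (fun pen s =>
      (PySem.List.pyRange 4 8).foldl (fun pen k =>
        (PySem.List.pyRange 0 (PySem.Str.len s - k + 1)).foldl (fun pen i =>
          if PySem.Str.isIn (PySem.Str.slice s (some i) (some (i + k))) pwl then pen + 3
          else pen) pen) pen) pen
      = pen + 3 * ((seqs.flatMap (fun s => (PySem.List.pyRange 4 8).flatMap (fun k =>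
          (PySem.List.pyRange 0 (PySem.Str.len s - k + 1)).map (fun i =>
            PySem.Str.slice s (some i) (some (i + k)))))).countP
              (fun w => PySem.Str.isIn w pwl) : Int) := by
  induction seqs generalizing pen with
  | nil => simp
  | cons s seqs ih =>
    simp only [List.foldl_cons]
    rw [pv_mid, ih, List.flatMap_cons, List.countP_append]
    push_cast; ring

lemma pv_A_eval (pw : String) :
    penalty_sequences pw
      = min (3 * ((pvCands.countP (fun w => PySem.Chars.isIn w (PySem.Chars.lower pw.toList))) : Int)) 12 := by
  simp only [penalty_sequences]
  rw [pv_outer, zero_add]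
  show min (3 * ((pvCandsStr.countP (fun w => PySem.Str.isIn w (PySem.Str.lower pw))) : Int)) 12 = _
  have hc : pvCandsStr.countP (fun w => PySem.Str.isIn w (PySem.Str.lower pw))
      = pvCands.countP (fun w => PySem.Chars.isIn w (PySem.Chars.lower pw.toList)) := by
    rw [pvCands, List.countP_map]
    refine List.countP_congr ?_
    intro w _
    simp only [Function.comp_def, PySem.Str.isIn_eq, PySem.Str.toList_lower]
  rw [hc]

-- B's found set, named
def pvFound (pw : String) : PySem.Set (List Char) :=
  let s : List Char := (PySem.Str.lower pw).toList
  (PySem.List.pyRange 4 8).foldl (fun fnd k =>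
    (PySem.List.pyRange 0 ((s.length : Int) - k + 1)).foldl (fun fnd p =>
      if pvIsRun (PySem.List.slice s (some p) (some (p + k))) then
        fnd.add (PySem.List.slice s (some p) (some (p + k)))
      else fnd) fnd) PySem.Set.empty

lemma pv_B_eval (pw : String) :
    penalty_sequences_alt pw = min (3 * ((pvFound pw).length : Int)) 12 := rfl

lemma pv_mem_inner (t : List Char) (k : Int) (l : List Int) (st : PySem.Set (List Char)) (y : List Char) :
    (y ∈ l.foldl (fun fnd p =>
        if pvIsRun (PySem.List.slice t (some p) (some (p + k))) then
          fnd.add (PySem.List.slice t (some p) (some (p + k)))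
        else fnd) st)
      ↔ y ∈ st ∨ ∃ p ∈ l, PySem.List.slice t (some p) (some (p + k)) = y ∧ pvIsRun y := by
  induction l generalizing st with
  | nil => simp
  | cons p l ih =>
    simp only [List.foldl_cons]
    by_cases h : pvIsRun (PySem.List.slice t (some p) (some (p + k)))
    · rw [if_pos h, ih]
      simp only [PySem.Set.mem_add, List.mem_cons]
      constructor
      · rintro ((hy | rfl) | ⟨q, hq, he, hr⟩)
        · exact Or.inl hy
        · exact Or.inr ⟨p, Or.inl rfl, rfl, h⟩
        · exact Or.inr ⟨q, Or.inr hq, he, hr⟩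
      · rintro (hy | ⟨q, (rfl | hq), he, hr⟩)
        · exact Or.inl (Or.inl hy)
        · exact Or.inl (Or.inr he.symm)
        · exact Or.inr ⟨q, hq, he, hr⟩
    · rw [if_neg h, ih]
      constructor
      · rintro (hy | ⟨q, hq, he, hr⟩)
        · exact Or.inl hy
        · exact Or.inr ⟨q, List.mem_cons_of_mem _ hq, he, hr⟩
      · rintro (hy | ⟨q, hq, he, hr⟩)
        · exact Or.inl hy
        · rcases List.mem_cons.mp hq with rfl | hq
          · exact absurd (he ▸ hr) h
          · exact Or.inr ⟨q, hq, he, hr⟩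

lemma pv_nodup_inner (t : List Char) (k : Int) (l : List Int) (st : PySem.Set (List Char))
    (h : st.Nodup) :
    (l.foldl (fun fnd p =>
        if pvIsRun (PySem.List.slice t (some p) (some (p + k))) then
          fnd.add (PySem.List.slice t (some p) (some (p + k)))
        else fnd) st).Nodup := by
  induction l generalizing st with
  | nil => exact h
  | cons p l ih =>
    simp only [List.foldl_cons]
    split_ifs with hc
    · exact ih _ (PySem.Set.nodup_add st _ h)
    · exact ih _ h

lemma pv_mem_found (pw : String) (y : List Char) :
    y ∈ pvFound pw ↔ ∃ k ∈ PySem.List.pyRange 4 8,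
      ∃ p ∈ PySem.List.pyRange 0 ((((PySem.Str.lower pw).toList.length : Int)) - k + 1),
        PySem.List.slice (PySem.Str.lower pw).toList (some p) (some (p + k)) = y ∧ pvIsRun y := by
  rw [pvFound]
  generalize (PySem.Str.lower pw).toList = t
  have main : ∀ (ks : List Int) (st : PySem.Set (List Char)),
      (y ∈ ks.foldl (fun fnd k =>
        (PySem.List.pyRange 0 ((t.length : Int) - k + 1)).foldl (fun fnd p =>
          if pvIsRun (PySem.List.slice t (some p) (some (p + k))) then
            fnd.add (PySem.List.slice t (some p) (some (p + k)))
          else fnd) fnd) st)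
      ↔ y ∈ st ∨ ∃ k ∈ ks, ∃ p ∈ PySem.List.pyRange 0 ((t.length : Int) - k + 1),
          PySem.List.slice t (some p) (some (p + k)) = y ∧ pvIsRun y := by
    intro ks
    induction ks with
    | nil => simp
    | cons k ks ih =>
      intro st
      simp only [List.foldl_cons]
      rw [ih, pv_mem_inner]
      constructor
      · rintro ((hy | hex) | ⟨q, hq, rest⟩)
        · exact Or.inl hy
        · exact Or.inr ⟨k, List.mem_cons_self .., hex⟩
        · exact Or.inr ⟨q, List.mem_cons_of_mem _ hq, rest⟩
      · rintro (hy | ⟨q, hq, rest⟩)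
        · exact Or.inl (Or.inl hy)
        · rcases List.mem_cons.mp hq with rfl | hq
          · exact Or.inl (Or.inr rest)
          · exact Or.inr ⟨q, hq, rest⟩
  rw [main]
  simp [PySem.Set.empty]

lemma pv_nodup_found (pw : String) : (pvFound pw).Nodup := by
  rw [pvFound]
  generalize (PySem.Str.lower pw).toList = t
  have main : ∀ (ks : List Int) (st : PySem.Set (List Char)), st.Nodup →
      (ks.foldl (fun fnd k =>
        (PySem.List.pyRange 0 ((t.length : Int) - k + 1)).foldl (fun fnd p =>
          if pvIsRun (PySem.List.slice t (some p) (some (p + k))) then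
            fnd.add (PySem.List.slice t (some p) (some (p + k)))
          else fnd) fnd) st).Nodup := by
    intro ks
    induction ks with
    | nil => exact fun _ h => h
    | cons k ks ih =>
      intro st h
      simp only [List.foldl_cons]
      exact ih _ (pv_nodup_inner _ _ _ _ h)
  exact main _ _ List.nodup_nil

lemma pv_slice_take_drop (t : List Char) (p k : Int) (hp : 0 ≤ p) (hk : 0 ≤ k) :
    PySem.List.slice t (some p) (some (p + k)) = (t.drop p.toNat).take ((p+k).toNat - p.toNat) := by
  rw [show (some p : Option Int) = some ((p.toNat : Nat) : Int) by rw [Int.toNat_of_nonneg hp],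
    show (some (p + k) : Option Int) = some ((((p+k).toNat : Nat)) : Int) by rw [Int.toNat_of_nonneg (by omega)],
    PySem.List.slice_natCast]

lemma pv_mem_found_iff (pw : String) (y : List Char) :
    y ∈ pvFound pw ↔ (pvIsRun y ∧ 4 ≤ y.length ∧ y.length ≤ 7 ∧ y <:+: (PySem.Str.lower pw).toList) := by
  rw [pv_mem_found]
  set t := (PySem.Str.lower pw).toList with ht
  constructor
  · rintro ⟨k, hk, p, hp, rfl, hr⟩
    rw [PySem.List.mem_pyRange_one] at hk hp
    have hp0 : 0 ≤ p := hp.1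
    have hk0 : (0:Int) ≤ k := by omega
    have hpk : p + k ≤ (t.length : Int) := by omega
    rw [pv_slice_take_drop t p k hp0 hk0] at hr ⊢
    have hlen : ((t.drop p.toNat).take ((p+k).toNat - p.toNat)).length = k.toNat := by
      rw [List.length_take, List.length_drop]; omega
    refine ⟨hr, ?_, ?_, ?_⟩
    · rw [hlen]; omega
    · rw [hlen]; omega
    · exact ((List.take_prefix _ _).isInfix).trans ((List.drop_suffix _ _).isInfix)
  · rintro ⟨hr, h4, h7, hinf⟩
    obtain ⟨u, v, huv⟩ := hinf
    refine ⟨(y.length : Int), ?_, (u.length : Int), ?_, ?_, hr⟩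
    · rw [PySem.List.mem_pyRange_one]; omega
    · rw [PySem.List.mem_pyRange_one]
      have : t.length = u.length + y.length + v.length := by
        rw [← huv]; simp; omega
      omega
    · rw [pv_slice_take_drop t _ _ (by positivity) (by positivity)]
      have h1 : ((u.length:Int)).toNat = u.length := by omega
      have h2 : (((u.length:Int)) + (y.length:Int)).toNat = u.length + y.length := by omega
      rw [h1, h2, ← huv]
      have : u ++ y ++ v = u ++ (y ++ v) := by simp
      rw [this, List.drop_left, Nat.add_sub_cancel_left, List.take_left]

-- every candidate window has length 4..7 and is a monotone run over one alphabet
set_option maxRecDepth 40000 in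
lemma pv_cands_shape : pvCands.all (fun w => decide (4 ≤ w.length) && decide (w.length ≤ 7) && pvMono w &&
    ((w.all (fun c => decide ('a' ≤ c) && decide (c ≤ 'z'))) ||
     (w.all (fun c => decide ('0' ≤ c) && decide (c ≤ '9'))) ||
     (w.all (fun c => decide ('A' ≤ c) && decide (c ≤ 'Z'))))) = true := by decide

-- the candidates are pairwise distinct (shown via an injective numeric key)
def pvEnc (w : List Char) : Nat := (w.headD ' ').toNat * 100 + (w.getD 1 ' ').toNat % 10 * 10 + w.length

set_option maxRecDepth 40000 in
lemma pv_enc_nodup : (pvCands.map pvEnc).Nodup := by decide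

lemma pv_nodup_cands : pvCands.Nodup := pv_enc_nodup.of_map

lemma pv_lower_no_upper (c : Char) :
    ¬ ('A' ≤ PySem.Chars.lowerChar c ∧ PySem.Chars.lowerChar c ≤ 'Z') := by
  rintro ⟨h1, h2⟩
  rw [pv_char_le_iff] at h1 h2
  have eA : ('A' : Char).toNat = 65 := rfl
  have eZ : ('Z' : Char).toNat = 90 := rfl
  by_cases hu : PySem.Chars.isupper c = true
  · have hb : 65 ≤ c.toNat ∧ c.toNat ≤ 90 := by
      simp only [PySem.Chars.isupper, Bool.and_eq_true, decide_eq_true_eq] at hu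
      exact ⟨(pv_char_le_iff _ _).mp hu.1, (pv_char_le_iff _ _).mp hu.2⟩
    rw [PySem.Chars.lowerChar, if_pos hu] at h1 h2
    have hres : (Char.ofNat (c.toNat + 32)).toNat = c.toNat + 32 := pv_toNat_ofNat _ (by omega)
    rw [hres] at h1 h2
    omega
  · rw [PySem.Chars.lowerChar, if_neg hu] at h1 h2
    apply hu
    simp only [PySem.Chars.isupper, Bool.and_eq_true, decide_eq_true_eq]
    exact ⟨(pv_char_le_iff _ _).mpr (by omega), (pv_char_le_iff _ _).mpr (by omega)⟩

-- a window of one of A's alphabets lies in pvCands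
lemma pv_window_mem_cands (s : String)
    (hs : s ∈ ["abcdefghijklmnopqrstuvwxyz", PySem.Str.upper "abcdefghijklmnopqrstuvwxyz", "0123456789",
      (PySem.Str.slice? "abcdefghijklmnopqrstuvwxyz" none none (-1)).getD "",
      (PySem.Str.slice? (PySem.Str.upper "abcdefghijklmnopqrstuvwxyz") none none (-1)).getD "",
      (PySem.Str.slice? "0123456789" none none (-1)).getD ""])
    (i n : Nat) (h4 : 4 ≤ n) (h8 : n < 8) (hle : i + n ≤ s.toList.length) :
    ((s.toList.drop i).take n) ∈ pvCands := by
  rw [pvCands, pvCandsStr]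
  refine List.mem_map.mpr ⟨PySem.Str.slice s (some (i:Int)) (some ((i:Int) + (n:Int))), ?_, ?_⟩
  · refine List.mem_flatMap.mpr ⟨s, hs, ?_⟩
    refine List.mem_flatMap.mpr ⟨(n:Int), ?_, ?_⟩
    · rw [PySem.List.mem_pyRange_one]; omega
    · refine List.mem_map.mpr ⟨(i:Int), ?_, rfl⟩
      rw [PySem.List.mem_pyRange_one]
      have hl : PySem.Str.len s = (s.toList.length : Int) := PySem.Str.len_eq s
      omega
  · rw [PySem.Str.toList_slice, PySem.Chars.slice_eq_listSlice,
      show ((i:Int) + (n:Int)) = (((i+n : Nat)) : Int) by push_cast; ring,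
      PySem.List.slice_natCast]
    congr 1
    omega

lemma pv_run_eq_window (s W : List Char) (i : Nat)
    (hlen : i + W.length ≤ s.length)
    (hj : ∀ j, (h : j < W.length) → W[j].toNat = (s[i+j]'(by omega)).toNat) :
    W = (s.drop i).take W.length := by
  apply List.ext_getElem
  · rw [List.length_take, List.length_drop]; omega
  · intro j h1 h2
    rw [List.getElem_take, List.getElem_drop]
    exact pv_char_eq _ _ (hj j h1)

lemma pv_case_helper (s : String)
    (hs : s ∈ ["abcdefghijklmnopqrstuvwxyz", PySem.Str.upper "abcdefghijklmnopqrstuvwxyz", "0123456789",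
      (PySem.Str.slice? "abcdefghijklmnopqrstuvwxyz" none none (-1)).getD "",
      (PySem.Str.slice? (PySem.Str.upper "abcdefghijklmnopqrstuvwxyz") none none (-1)).getD "",
      (PySem.Str.slice? "0123456789" none none (-1)).getD ""])
    (g : Nat → Int)
    (hg : ∀ m, m < s.toList.length → ((s.toList.getD m ' ').toNat : Int) = g m)
    (W : List Char) (i : Nat) (h4 : 4 ≤ W.length) (h8 : W.length < 8)
    (hlen : i + W.length ≤ s.toList.length)
    (hW : ∀ j, (hj : j < W.length) → (((W[j]).toNat : Int)) = g (i + j)) :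
    W ∈ pvCands := by
  have hEq := pv_run_eq_window s.toList W i hlen (fun j hj => by
    have h1 := hW j hj
    have h2 := hg (i+j) (by omega)
    rw [List.getD_eq_getElem _ _ (by omega : i + j < s.toList.length)] at h2
    omega)
  rw [hEq]
  exact pv_window_mem_cands s hs i W.length h4 h8 hlen

lemma pv_run_index (d : Int) : ∀ (w : List Char),
    ((w.zip w.tail).all (fun p => ((p.2.toNat : Int) - (p.1.toNat : Int)) == d)) = true →
    ∀ j, (hj : j < w.length) → ((w[j].toNat : Int)) = ((w.headD ' ').toNat : Int) + d * j := by
  intro w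
  induction w with
  | nil => intro _ j hj; simp at hj
  | cons a w ih =>
    intro hall j hj
    cases w with
    | nil =>
      have hj0 : j = 0 := by simp at hj; omega
      subst hj0; simp
    | cons b r =>
      have htail : (a :: b :: r).tail = b :: r := rfl
      rw [htail, List.zip_cons_cons, List.all_cons] at hall
      have h1 : ((b.toNat : Int) - (a.toNat : Int)) = d := by
        have := (Bool.and_eq_true _ _).mp hall |>.1
        exact beq_iff_eq.mp this
      have hrest := (Bool.and_eq_true _ _).mp hall |>.2
      cases j with
      | zero => simp
      | succ j =>
        have hj' : j < (b :: r).length := by simpa using hj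
        have := ih (by simpa using hrest) j hj'
        simp only [List.getElem_cons_succ]
        rw [this]
        simp only [List.headD_cons]
        have hb : ((b.toNat : Int)) = (a.toNat : Int) + d := by omega
        rw [hb]
        push_cast
        ring

lemma pv_run_mem_cands (w : List Char) (h : pvIsRun w = true) (h4 : 4 ≤ w.length) (h7 : w.length ≤ 7) :
    w ∈ pvCands := by
  rw [pvIsRun_eq] at h
  obtain ⟨hm, hcls⟩ := Bool.and_eq_true _ _ |>.mp h
  match w, hm with
  | a :: b :: r, hm => ?_
  case _ =>
  simp only [pvMono] at hm
  obtain ⟨hd, hall⟩ := Bool.and_eq_true _ _ |>.mp hm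
  have hd' : ((b.toNat : Int) - (a.toNat : Int)) = 1 ∨ ((b.toNat : Int) - (a.toNat : Int)) = -1 := by
    rcases Bool.or_eq_true _ _ |>.mp hd with h' | h'
    · exact Or.inl (beq_iff_eq.mp h')
    · exact Or.inr (beq_iff_eq.mp h')
  have hlen2 : (a :: b :: r).length = r.length + 2 := by simp
  have idx := pv_run_index _ (a :: b :: r) hall
  simp only [List.headD_cons] at idx
  have hj9 : (a :: b :: r).length - 1 < (a :: b :: r).length := by omega
  have hlast := idx _ hj9
  have hbounds : (∀ j, (hj : j < (a :: b :: r).length) → 97 ≤ ((a :: b :: r)[j]).toNat ∧ ((a :: b :: r)[j]).toNat ≤ 122) ∨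
      (∀ j, (hj : j < (a :: b :: r).length) → 48 ≤ ((a :: b :: r)[j]).toNat ∧ ((a :: b :: r)[j]).toNat ≤ 57) := by
    rcases Bool.or_eq_true _ _ |>.mp hcls with hc | hc
    · left
      intro j hj
      have := List.all_eq_true.mp hc _ ((a :: b :: r).getElem_mem hj)
      obtain ⟨u1, u2⟩ := Bool.and_eq_true _ _ |>.mp this
      have v1 := (pv_char_le_iff _ _).mp (of_decide_eq_true u1)
      have v2 := (pv_char_le_iff _ _).mp (of_decide_eq_true u2)
      constructor <;> simpa using ‹_›
    · right
      intro j hj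
      have := List.all_eq_true.mp hc _ ((a :: b :: r).getElem_mem hj)
      obtain ⟨u1, u2⟩ := Bool.and_eq_true _ _ |>.mp this
      have v1 := (pv_char_le_iff _ _).mp (of_decide_eq_true u1)
      have v2 := (pv_char_le_iff _ _).mp (of_decide_eq_true u2)
      constructor <;> simpa using ‹_›
  rcases hd' with hd1 | hd1 <;> rcases hbounds with hb | hb <;>
    [skip; skip; skip; skip]
  · -- ascending letters
    have hlo : 97 ≤ a.toNat ∧ a.toNat ≤ 122 := by simpa using hb 0 (by omega)
    have hhi := hb _ hj9
    rw [hd1] at hlast idx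
    refine pv_case_helper "abcdefghijklmnopqrstuvwxyz" (by decide) (fun m => 97 + (m : Int))
      (by decide) (a :: b :: r) (a.toNat - 97) h4 (by omega) (by simp; omega) ?_
    intro j hj
    have := idx j hj
    dsimp only
    omega
  · -- ascending digits
    have hlo : 48 ≤ a.toNat ∧ a.toNat ≤ 57 := by simpa using hb 0 (by omega)
    have hhi := hb _ hj9
    rw [hd1] at hlast idx
    refine pv_case_helper "0123456789" (by decide) (fun m => 48 + (m : Int))
      (by decide) (a :: b :: r) (a.toNat - 48) h4 (by omega) (by simp; omega) ?_
    intro j hj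
    have := idx j hj
    dsimp only
    omega
  · -- descending letters
    have hlo : 97 ≤ a.toNat ∧ a.toNat ≤ 122 := by simpa using hb 0 (by omega)
    have hhi := hb _ hj9
    rw [hd1] at hlast idx
    refine pv_case_helper ((PySem.Str.slice? "abcdefghijklmnopqrstuvwxyz" none none (-1)).getD "")
      (by decide) (fun m => 122 - (m : Int)) (by decide) (a :: b :: r) (122 - a.toNat) h4 (by omega)
      (by have h26 : ((PySem.Str.slice? "abcdefghijklmnopqrstuvwxyz" none none (-1)).getD "").toList.length = 26 := by decide
          simp only [h26, List.length_cons]; omega) ?_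
    intro j hj
    have := idx j hj
    dsimp only
    omega
  · -- descending digits
    have hlo : 48 ≤ a.toNat ∧ a.toNat ≤ 57 := by simpa using hb 0 (by omega)
    have hhi := hb _ hj9
    rw [hd1] at hlast idx
    refine pv_case_helper ((PySem.Str.slice? "0123456789" none none (-1)).getD "")
      (by decide) (fun m => 57 - (m : Int)) (by decide) (a :: b :: r) (57 - a.toNat) h4 (by omega)
      (by have h10 : ((PySem.Str.slice? "0123456789" none none (-1)).getD "").toList.length = 10 := by decide
          simp only [h10, List.length_cons]; omega) ?_
    intro j hj
    have := idx j hj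
    dsimp only
    omega

-- matched candidates = B's found set, elementwise
lemma pv_mem_iff (pw : String) (w : List Char) :
    w ∈ pvCands.filter (fun w => PySem.Chars.isIn w (PySem.Chars.lower pw.toList)) ↔ w ∈ pvFound pw := by
  rw [List.mem_filter, pv_mem_found_iff, PySem.Str.toList_lower]
  constructor
  · rintro ⟨hc, hin⟩
    have hinf : w <:+: PySem.Chars.lower pw.toList := (PySem.Chars.isIn_iff_infix _ _).mp hin
    have hshape := List.all_eq_true.mp pv_cands_shape w hc
    obtain ⟨h1, hcls⟩ := Bool.and_eq_true _ _ |>.mp hshape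
    obtain ⟨h2, hmono⟩ := Bool.and_eq_true _ _ |>.mp h1
    obtain ⟨h4', h7'⟩ := Bool.and_eq_true _ _ |>.mp h2
    have h4 : 4 ≤ w.length := of_decide_eq_true h4'
    have h7 : w.length ≤ 7 := of_decide_eq_true h7'
    have hrun : pvIsRun w = true := by
      rw [pvIsRun_eq, hmono, Bool.true_and]
      rcases Bool.or_eq_true _ _ |>.mp hcls with hc2 | hup
      · exact hc2
      · -- uppercase windows cannot occur in a lowercased string
        exfalso
        have hne : 0 < w.length := by omega
        have hhead := List.all_eq_true.mp hup _ (w.getElem_mem hne)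
        obtain ⟨u1, u2⟩ := Bool.and_eq_true _ _ |>.mp hhead
        have hmem : w[0] ∈ PySem.Chars.lower pw.toList := hinf.subset (w.getElem_mem hne)
        rw [PySem.Chars.lower] at hmem
        obtain ⟨c, _, hce⟩ := List.mem_map.mp hmem
        exact pv_lower_no_upper c (hce ▸ ⟨of_decide_eq_true u1, of_decide_eq_true u2⟩)
    exact ⟨hrun, h4, h7, hinf⟩
  · rintro ⟨hr, h4, h7, hinf⟩
    exact ⟨pv_run_mem_cands w hr h4 h7, (PySem.Chars.isIn_iff_infix _ _).mpr hinf⟩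

lemma pv_count_eq (pw : String) :
    pvCands.countP (fun w => PySem.Chars.isIn w (PySem.Chars.lower pw.toList)) = (pvFound pw).length := by
  rw [List.countP_eq_length_filter]
  exact List.Perm.length_eq ((List.perm_ext_iff_of_nodup
    (List.Nodup.filter _ pv_nodup_cands) (pv_nodup_found pw)).mpr (fun a => pv_mem_iff pw a))

-- ===== VERDICT (by name: the statement is the Claim_ definition above) =====
theorem penalty_sequences_spec : Claim_equal_penalty_sequences := by
  intro pw _
  show penalty_sequences pw = penalty_sequences_alt pw
  rw [pv_A_eval, pv_B_eval, pv_count_eq]
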